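-- pv_equiv track=rewrite | github.com/iiasa/low-ai | 00_vLLM_hierarchical.py | _parse_single_choice
-- ===== SOURCE A (Python) =====
-- from typing import Dict, List, Tuple, Any, Optional
--
-- def _parse_single_choice(content: str, options: List[str], map_to: Optional[Dict[str, str]]) -> str:
--     """Return first matching option (by substring, longest first); apply map_to if set."""
--     c = content.strip().lower()
--     # Prefer longest option first so "explicit approval" matches before "explicit"
--     for opt in sorted(options, key=len, reverse=True):
--         if opt.lower() in c:
--             out = opt.lower()
--             if map_to:
--                 out = map_to.get(out, out)
--             return out
--     return options[0] if options else ""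
-- ===== SOURCE B (Python) =====
-- from typing import Dict, List, Optional
--
-- def _parse_single_choice(content: str, options: List[str], map_to: Optional[Dict[str, str]]) -> str:
--     """Single pass, no sort: keep the strictly longest matching option (earliest on ties)."""
--     c = content.strip().lower()
--     best = None
--     for opt in options:
--         if (best is None or len(opt) > len(best)) and opt.lower() in c:
--             best = opt
--     if best is None:
--         return options[0] if options else ""
--     out = best.lower()
--     if map_to:
--         out = map_to.get(out, out)
--     return out
-- ===== Notes on version B (the rewrite author's own statement) =====
-- stated objective: alternative
-- what changed: Replaced A's sort-by-length-descending-then-first-match scan with a single unsorted pass that keeps the strictly longest matching option (strict > preserves A's stable-sort tie-breaking), testing the cheap length condition before the substring test.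
import Mathlib
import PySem

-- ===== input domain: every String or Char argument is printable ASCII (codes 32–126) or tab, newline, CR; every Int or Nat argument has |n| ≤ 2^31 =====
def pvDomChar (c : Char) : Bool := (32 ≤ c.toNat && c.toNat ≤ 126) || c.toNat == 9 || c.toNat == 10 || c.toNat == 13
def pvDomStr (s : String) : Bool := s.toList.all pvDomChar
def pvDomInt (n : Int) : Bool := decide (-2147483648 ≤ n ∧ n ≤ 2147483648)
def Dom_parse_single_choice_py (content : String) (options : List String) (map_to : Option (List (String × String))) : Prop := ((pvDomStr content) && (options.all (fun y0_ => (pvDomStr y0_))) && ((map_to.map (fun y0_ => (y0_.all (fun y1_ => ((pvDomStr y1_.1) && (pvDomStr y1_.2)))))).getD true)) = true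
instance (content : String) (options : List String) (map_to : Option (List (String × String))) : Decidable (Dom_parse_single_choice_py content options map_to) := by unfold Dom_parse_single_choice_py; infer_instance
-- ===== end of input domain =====

-- B replaces A's sort-then-scan by a single pass keeping the strictly longest matching option; same return value everywhere.

-- ===== PORT A =====
-- for-loop with early return over sorted(options, key=len, reverse=True) = find? over the sorted list
def parse_single_choice_py (content : String) (options : List String) (map_to : Option (List (String × String))) : String :=
  let c := PySem.Str.lower (PySem.Str.strip content)
  match (PySem.List.sorted options (fun o => PySem.Str.len o) true).find?
      (fun opt => PySem.Str.isIn (PySem.Str.lower opt) c) with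
  | some opt =>
      let out := PySem.Str.lower opt
      match map_to with
      | some m => if m.isEmpty then out else PySem.Dict.getD (PySem.Dict.ofList m) out out
      | none => out
  | none => match options with
      | [] => ""
      | o :: _ => o

-- ===== PORT B =====
def parse_single_choice_py_alt (content : String) (options : List String) (map_to : Option (List (String × String))) : String :=
  let c := PySem.Str.lower (PySem.Str.strip content)
  let best := options.foldl (fun best opt =>
      if (match best with
          | none => true
          | some b => decide (PySem.Str.len b < PySem.Str.len opt)) &&
         PySem.Str.isIn (PySem.Str.lower opt) c
      then some opt else best) none
  match best with
  | none => match options with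
      | [] => ""
      | o :: _ => o
  | some b =>
      let out := PySem.Str.lower b
      match map_to with
      | some m => if m.isEmpty then out else PySem.Dict.getD (PySem.Dict.ofList m) out out
      | none => out

-- ===== PRECONDITION & SPEC =====
def Spec_parse_single_choice_py (content : String) (options : List String) (map_to : Option (List (String × String))) (out : String) : Prop := out = parse_single_choice_py_alt content options map_to
instance (content : String) (options : List String) (map_to : Option (List (String × String))) (out : String) : Decidable (Spec_parse_single_choice_py content options map_to out) := by unfold Spec_parse_single_choice_py; infer_instance

-- ===== CLAIM (what is proved, stated in full; the proofs are below) =====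
def Claim_equal_parse_single_choice_py : Prop := ∀ (content : String) (options : List String) (map_to : Option (List (String × String))), Dom_parse_single_choice_py content options map_to → Spec_parse_single_choice_py content options map_to (parse_single_choice_py content options map_to)

-- ===== LEMMAS AND PROOFS =====

-- B's one step of the selection fold
def pvStep (P : String → Bool) (best : Option String) (opt : String) : Option String :=
  if (match best with
      | none => true
      | some b => decide (PySem.Str.len b < PySem.Str.len opt)) &&
     P opt
  then some opt else best

-- inserting x into a length-descending list: find? of the result is one pvStep
theorem find?_insertBy_step (P : String → Bool) (x : String) (acc : List String)
    (hp : acc.Pairwise (fun a b => PySem.Str.len b ≤ PySem.Str.len a)) :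
    (PySem.List.insertBy (fun a b => decide (PySem.Str.len b < PySem.Str.len a)) x acc).find? P
      = pvStep P (acc.find? P) x := by
  induction acc with
  | nil =>
    by_cases hx : P x = true <;>
      simp [PySem.List.insertBy, pvStep, List.find?, hx]
  | cons y ys ih =>
    rcases List.pairwise_cons.mp hp with ⟨hy, hys⟩
    by_cases hlt : PySem.Str.len y < PySem.Str.len x
    · -- x goes in front of y
      simp only [PySem.List.insertBy, decide_eq_true_eq, if_pos hlt]
      by_cases hx : P x = true
      · -- x matches: result is some x; B's step also picks x
        have hstep : pvStep P ((y :: ys).find? P) x = some x := by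
          cases hfind : (y :: ys).find? P with
          | none => simp [pvStep, hx]
          | some b =>
            have hb : b ∈ y :: ys := List.mem_of_find?_eq_some hfind
            have hble : PySem.Str.len b ≤ PySem.Str.len y := by
              rcases List.mem_cons.mp hb with h | h
              · exact h ▸ le_refl _
              · exact hy b h
            have hbl : b.length < x.length := by
              simpa using lt_of_le_of_lt hble hlt
            simp [pvStep, hx, not_le.mpr hbl]
        rw [hstep]
        simp [List.find?, hx]
      · simp [List.find?, hx, pvStep]
    · -- x goes somewhere after y
      simp only [PySem.List.insertBy, decide_eq_true_eq, if_neg hlt]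
      by_cases hyP : P y = true
      · -- y still found first; B's step keeps some y since ¬(len y < len x)
        have hnl : ¬ y.length < x.length := by simpa using hlt
        simp [List.find?, hyP, pvStep, hnl]
      · rw [List.find?_cons_of_neg (by simp [hyP]), List.find?_cons_of_neg (by simp [hyP])]
        exact ih hys

-- insertBy into a length-descending list stays length-descending
theorem insertBy_pairwise (x : String) (acc : List String)
    (hp : acc.Pairwise (fun a b => PySem.Str.len b ≤ PySem.Str.len a)) :
    (PySem.List.insertBy (fun a b => decide (PySem.Str.len b < PySem.Str.len a)) x acc).Pairwise
      (fun a b => PySem.Str.len b ≤ PySem.Str.len a) := by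
  induction acc with
  | nil => simp [PySem.List.insertBy]
  | cons y ys ih =>
    rcases List.pairwise_cons.mp hp with ⟨hy, hys⟩
    by_cases hlt : PySem.Str.len y < PySem.Str.len x
    · simp only [PySem.List.insertBy, decide_eq_true_eq, if_pos hlt]
      refine List.pairwise_cons.mpr ⟨?_, hp⟩
      intro b hb
      rcases List.mem_cons.mp hb with h | h
      · exact h ▸ le_of_lt hlt
      · exact le_trans (hy b h) (le_of_lt hlt)
    · simp only [PySem.List.insertBy, decide_eq_true_eq, if_neg hlt]
      refine List.pairwise_cons.mpr ⟨?_, ih hys⟩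
      intro b hb
      rcases (PySem.List.mem_insertBy _ _ _ _).mp hb with hbx | hbys
      · exact hbx ▸ not_lt.mp hlt
      · exact hy b hbys

-- whole loop: find? over the insertBy fold = B's selection fold
theorem find?_foldl_insertBy (P : String → Bool) (xs : List String) :
    ∀ (acc : List String),
      acc.Pairwise (fun a b => PySem.Str.len b ≤ PySem.Str.len a) →
      (xs.foldl (fun acc x =>
          PySem.List.insertBy (fun a b => decide (PySem.Str.len b < PySem.Str.len a)) x acc) acc).find? P
        = xs.foldl (pvStep P) (acc.find? P) := by
  induction xs with
  | nil => intro acc _; rfl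
  | cons x xs ih =>
    intro acc hp
    simp only [List.foldl_cons]
    rw [ih _ (insertBy_pairwise x acc hp), find?_insertBy_step P x acc hp]

theorem find?_sorted_eq_fold (P : String → Bool) (xs : List String) :
    (PySem.List.sorted xs (fun o => PySem.Str.len o) true).find? P
      = xs.foldl (pvStep P) none := by
  rw [PySem.List.sorted_rev_eq_foldl_insertBy]
  exact find?_foldl_insertBy P xs [] List.Pairwise.nil

-- ===== VERDICT (by name: the statement is the Claim_ definition above) =====
theorem parse_single_choice_py_spec : Claim_equal_parse_single_choice_py := by
  intro content options map_to _
  simp only [Spec_parse_single_choice_py, parse_single_choice_py, parse_single_choice_py_alt]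
  rw [find?_sorted_eq_fold]
  have hfun : (pvStep fun opt => PySem.Str.isIn (PySem.Str.lower opt) (PySem.Str.lower (PySem.Str.strip content)))
      = (fun (best : Option String) (opt : String) =>
          if (match best with
              | none => true
              | some b => decide (PySem.Str.len b < PySem.Str.len opt)) &&
             PySem.Str.isIn (PySem.Str.lower opt) (PySem.Str.lower (PySem.Str.strip content))
          then some opt else best) := by
    funext best opt
    rfl
  rw [hfun]
  cases List.foldl _ none options <;> rfl
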